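-- pv_equiv track=rewrite | github.com/DU1999/RES-RAG | chunking/tools/process_list.py | remove_parentheses_by_prefixes
-- ===== SOURCE A (Python) =====
-- def remove_parentheses_by_prefixes(s: str) -> str:
--     """
--     Delete fragments of the form (...), including the parentheses themselves, when the first non-whitespace character inside the parentheses starts with one of the specified prefixes. Nested parentheses are supported.
--     Target prefixes: /wiki, //en, https, /w/, #, /static
--     """
--     prefixes = ("/wiki", "//en", "https", "/w/", "#", "/static")
--
--     out = []
--     i, n = 0, len(s)
--
--     while i < n:
--         ch = s[i]
--         if ch != '(':
--             out.append(ch)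
--             i += 1
--             continue
--
--         j = i + 1
--         while j < n and s[j].isspace():
--             j += 1
--
--         if j >= n or not any(s.startswith(pfx, j) for pfx in prefixes):
--             out.append('(')
--             i += 1
--             continue
--
--         depth = 1
--         k = i + 1
--         while k < n and depth > 0:
--             if s[k] == '(':
--                 depth += 1
--             elif s[k] == ')':
--                 depth -= 1
--             k += 1
--
--         if depth > 0:
--             i += 1
--         else:
--             i = k
--
--     return ''.join(out)
-- ===== SOURCE B (Python) =====
-- def remove_parentheses_by_prefixes(s: str) -> str:
--     """
--     Delete fragments of the form (...), including the parentheses themselves, when the first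
--     non-whitespace character inside the parentheses starts with one of the specified prefixes.
--     Nested parentheses are supported.
--     Target prefixes: /wiki, //en, https, /w/, #, /static
--     """
--     prefixes = ("/wiki", "//en", "https", "/w/", "#", "/static")
--     n = len(s)
--
--     # One stack pass: matching close paren index for every balanced open paren.
--     match = {}
--     stack = []
--     for idx, ch in enumerate(s):
--         if ch == '(':
--             stack.append(idx)
--         elif ch == ')' and stack:
--             match[stack.pop()] = idx
--
--     pieces = []
--     i = 0
--     while i < n:
--         ch = s[i]
--         if ch == '(':
--             j = i + 1
--             while j < n and s[j].isspace():
--                 j += 1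
--             if j < n and s.startswith(prefixes, j):
--                 # drop the whole (...) group if balanced, else just this '('
--                 i = match[i] + 1 if i in match else i + 1
--                 continue
--         pieces.append(ch)
--         i += 1
--     return ''.join(pieces)
-- ===== Notes on version B (the rewrite author's own statement) =====
-- stated objective: alternative
-- what changed: Replaces A's per-open-paren depth-counting rescan with a single stack pass that precomputes every matching close-paren index, then one output pass that skips deletable groups by table lookup.
import Mathlib
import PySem

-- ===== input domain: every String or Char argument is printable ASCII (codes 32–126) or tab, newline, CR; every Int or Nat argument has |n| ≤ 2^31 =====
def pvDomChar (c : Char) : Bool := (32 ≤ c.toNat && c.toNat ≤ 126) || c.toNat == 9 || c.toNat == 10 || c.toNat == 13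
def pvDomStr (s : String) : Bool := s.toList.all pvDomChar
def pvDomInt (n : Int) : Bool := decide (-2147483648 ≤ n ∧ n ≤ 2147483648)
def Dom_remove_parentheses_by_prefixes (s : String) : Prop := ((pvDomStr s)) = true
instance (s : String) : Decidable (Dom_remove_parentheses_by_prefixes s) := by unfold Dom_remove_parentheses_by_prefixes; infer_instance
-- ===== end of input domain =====

-- B replaces A's per-'(' depth-counting rescan by one stack pass precomputing each open paren's
-- matching close index, then one output pass (objective: alternative algorithm; same measured cost).
-- All loops carry a `fuel : Nat` parameter as a pure totality guard (each Python loop advances its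
-- index by ≥ 1 per iteration and stops at the string's end, so fuel = length is never exhausted).

-- ===== PORT A =====
-- shared literal data / primitive wrappers (identical code in both Pythons)
def pvPrefixes : List (List Char) :=
  ["/wiki".toList, "//en".toList, "https".toList, "/w/".toList, "#".toList, "/static".toList]

-- s.startswith(pfx, j) for 0 ≤ j (exact: Python clamps j past the end to False for nonempty pfx)
def pvStartsWithAt (cs : List Char) (j : Nat) (p : List Char) : Bool :=
  PySem.Chars.startswith (cs.drop j) p

-- the inner `while j < n and s[j].isspace(): j += 1`
def pvSkipWS : Nat → List Char → Nat → Nat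
  | 0, _, j => j
  | fuel + 1, cs, j =>
    if h : j < cs.length then
      if PySem.Chars.isspace cs[j] then pvSkipWS fuel cs (j + 1) else j
    else j

-- depth update of A's scan loop body
def pvUpd (c : Char) (d : Nat) : Nat :=
  if c = '(' then d + 1 else if c = ')' then d - 1 else d

-- A's `while k < n and depth > 0` scan; returns (k, depth)
def pvScan : Nat → List Char → Nat → Nat → Nat × Nat
  | 0, _, k, d => (k, d)
  | fuel + 1, cs, k, d =>
    if h : k < cs.length ∧ 0 < d then pvScan fuel cs (k + 1) (pvUpd (cs[k]'h.1) d)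
    else (k, d)

def pvLoopA : Nat → List Char → Nat → List Char → List Char
  | 0, _, _, out => out
  | fuel + 1, cs, i, out =>
    if h : i < cs.length then
      if cs[i] ≠ '(' then
        pvLoopA fuel cs (i + 1) (out ++ [cs[i]])
      else
        let j := pvSkipWS cs.length cs (i + 1)
        if cs.length ≤ j ∨ ¬ (pvPrefixes.any fun p => pvStartsWithAt cs j p) then
          pvLoopA fuel cs (i + 1) (out ++ ['('])
        else
          let r := pvScan cs.length cs (i + 1) 1
          if 0 < r.2 then pvLoopA fuel cs (i + 1) out
          else pvLoopA fuel cs r.1 out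
    else out

def remove_parentheses_by_prefixes (s : String) : String :=
  String.ofList (pvLoopA s.toList.length s.toList 0 [])

-- ===== PORT B =====
-- one forward stack pass: matching close index for every balanced '('
def pvBuild : Nat → List Char → Nat → List Nat → PySem.Dict Nat Nat → PySem.Dict Nat Nat
  | 0, _, _, _, d => d
  | fuel + 1, cs, m, stack, d =>
    if h : m < cs.length then
      if cs[m] = '(' then pvBuild fuel cs (m + 1) (m :: stack) d
      else if cs[m] = ')' then
        match stack with
        | a :: rest => pvBuild fuel cs (m + 1) rest (d.insert a m)
        | [] => pvBuild fuel cs (m + 1) [] d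
      else pvBuild fuel cs (m + 1) stack d
    else d

def pvLoopB : Nat → List Char → PySem.Dict Nat Nat → Nat → List Char → List Char
  | 0, _, _, _, acc => acc
  | fuel + 1, cs, mt, i, acc =>
    if h : i < cs.length then
      if cs[i] = '(' then
        let j := pvSkipWS cs.length cs (i + 1)
        if j < cs.length ∧ (pvPrefixes.any fun p => pvStartsWithAt cs j p) then
          match mt.get? i with
          | some k => pvLoopB fuel cs mt (k + 1) acc
          | none => pvLoopB fuel cs mt (i + 1) acc
        else pvLoopB fuel cs mt (i + 1) (acc ++ [cs[i]])
      else pvLoopB fuel cs mt (i + 1) (acc ++ [cs[i]])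
    else acc

def remove_parentheses_by_prefixes_alt (s : String) : String :=
  String.ofList
    (pvLoopB s.toList.length s.toList (pvBuild s.toList.length s.toList 0 [] PySem.Dict.empty) 0 [])

-- ===== PRECONDITION & SPEC =====
def Spec_remove_parentheses_by_prefixes (s : String) (out : String) : Prop := out = remove_parentheses_by_prefixes_alt s
instance (s : String) (out : String) : Decidable (Spec_remove_parentheses_by_prefixes s out) := by unfold Spec_remove_parentheses_by_prefixes; infer_instance

-- ===== CLAIM (what is proved, stated in full; the proofs are below) =====
def Claim_equal_remove_parentheses_by_prefixes : Prop := ∀ (s : String), Dom_remove_parentheses_by_prefixes s → Spec_remove_parentheses_by_prefixes s (remove_parentheses_by_prefixes s)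

-- ===== LEMMAS AND PROOFS =====

-- enough fuel never runs out: pvScan with any two sufficient fuels agrees
theorem pvScan_fuel (cs : List Char) :
    ∀ f f' k d, cs.length ≤ k + f → cs.length ≤ k + f' →
      pvScan f cs k d = pvScan f' cs k d := by
  intro f
  induction f with
  | zero =>
    intro f' k d hf hf'
    cases f' with
    | zero => rfl
    | succ f' =>
      have : ¬ (k < cs.length ∧ 0 < d) := by omega
      simp [pvScan, this]
  | succ f ih =>
    intro f' k d hf hf'
    cases f' with
    | zero =>
      have : ¬ (k < cs.length ∧ 0 < d) := by omega
      simp [pvScan, this]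
    | succ f' =>
      simp only [pvScan]
      split
      · exact ih f' (k + 1) _ (by omega) (by omega)
      · rfl

theorem pvScan_step (cs : List Char) {k : Nat} (d : Nat) (h : k < cs.length) (hd : 0 < d) :
    pvScan cs.length cs k d = pvScan cs.length cs (k + 1) (pvUpd cs[k] d) := by
  have h1 : pvScan cs.length cs k d = pvScan (cs.length + 1) cs k d :=
    pvScan_fuel cs _ _ k d (by omega) (by omega)
  rw [h1]
  show (if h : k < cs.length ∧ 0 < d then pvScan cs.length cs (k + 1) (pvUpd (cs[k]'h.1) d)
        else (k, d)) = _
  simp [h, hd]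

theorem pvScan_stop_len (cs : List Char) (f : Nat) {k : Nat} (d : Nat) (h : cs.length ≤ k) :
    pvScan f cs k d = (k, d) := by
  cases f with
  | zero => rfl
  | succ f =>
    have : ¬ (k < cs.length ∧ 0 < d) := by omega
    simp [pvScan, this]

theorem pvScan_stop_zero (cs : List Char) (f k : Nat) : pvScan f cs k 0 = (k, 0) := by
  cases f with
  | zero => rfl
  | succ f => simp [pvScan]

-- invariant of B's stack pass, relating the stack and dict to A's depth scan
def pvInv (cs : List Char) (m : Nat) (st : List Nat) (d : PySem.Dict Nat Nat) : Prop :=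
  (∀ r (hr : r < st.length),
    st[r] < m ∧ pvScan cs.length cs (st[r] + 1) 1 = pvScan cs.length cs m (r + 1)) ∧
  (∀ a k, d.get? a = some k → pvScan cs.length cs (a + 1) 1 = (k + 1, 0)) ∧
  (∀ a, a < m → cs[a]? = some '(' → a ∈ st ∨ (d.get? a).isSome)

theorem pvBuild_post (cs : List Char) :
    ∀ (f m : Nat) (st : List Nat) (d : PySem.Dict Nat Nat), cs.length ≤ m + f →
      pvInv cs m st d →
      (∀ a k, (pvBuild f cs m st d).get? a = some k →
        pvScan cs.length cs (a + 1) 1 = (k + 1, 0)) ∧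
      (∀ a, a < cs.length → cs[a]? = some '(' → (pvBuild f cs m st d).get? a = none →
        0 < (pvScan cs.length cs (a + 1) 1).2) := by
  intro f
  induction f with
  | zero =>
    intro m st d hf ⟨h1, h2, h3⟩
    simp only [pvBuild]
    refine ⟨h2, ?_⟩
    intro b hb hch hnone
    have hm : b < m := by omega
    rcases h3 b hm hch with hmem | hsome
    · obtain ⟨r, hr, hra⟩ := List.mem_iff_getElem.mp hmem
      have := (h1 r hr).2
      rw [hra] at this
      rw [this, pvScan_stop_len cs cs.length (r + 1) (by omega)]
      simp
    · rw [hnone] at hsome; simp at hsome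
  | succ f ih =>
    intro m st d hf hInv
    obtain ⟨h1, h2, h3⟩ := hInv
    by_cases h : m < cs.length
    · simp only [pvBuild, dif_pos h]
      by_cases hop : cs[m] = '('
      · -- push
        simp only [hop, if_true]
        apply ih (m + 1) (m :: st) d (by omega)
        refine ⟨?_, h2, ?_⟩
        · intro r hr
          cases r with
          | zero =>
            refine ⟨by simp, ?_⟩
            simp
          | succ r =>
            have hr' : r < st.length := by simpa using hr
            obtain ⟨hlt, hsc⟩ := h1 r hr'
            refine ⟨by simp; omega, ?_⟩
            simp only [List.getElem_cons_succ]
            rw [hsc, pvScan_step cs (r + 1) h (by omega)]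
            simp [pvUpd, hop]
        · intro b hb hch
          rcases Nat.lt_or_ge b m with hb' | hb'
          · rcases h3 b hb' hch with hst | hd
            · exact Or.inl (List.mem_cons_of_mem _ hst)
            · exact Or.inr hd
          · have : b = m := by omega
            subst this; exact Or.inl List.mem_cons_self
      · by_cases hcl : cs[m] = ')'
        · simp only [hcl, if_true]
          cases hst : st with
          | cons a rest =>
            -- pop and record the pair
            subst hst
            apply ih (m + 1) rest (d.insert a m) (by omega)
            have hsc0 : pvScan cs.length cs (a + 1) 1 = (m + 1, 0) := by
              have := (h1 0 (by simp)).2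
              simp only [List.getElem_cons_zero] at this
              rw [this, pvScan_step cs 1 h (by omega)]
              simp [pvUpd, hcl, pvScan_stop_zero]
            refine ⟨?_, ?_, ?_⟩
            · intro r hr
              have hr' : r + 1 < (a :: rest).length := by simpa using hr
              obtain ⟨hlt, hsc⟩ := h1 (r + 1) hr'
              simp only [List.getElem_cons_succ] at hlt hsc
              refine ⟨by omega, ?_⟩
              rw [hsc, pvScan_step cs (r + 1 + 1) h (by omega)]
              simp [pvUpd, hcl]
            · intro b k hbk
              rcases eq_or_ne b a with rfl | hba
              · rw [PySem.Dict.get?_insert_self] at hbk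
                cases hbk; simpa using hsc0
              · rw [PySem.Dict.get?_insert_of_ne _ _ hba] at hbk
                exact h2 b k hbk
            · intro b hb hch
              rcases Nat.lt_or_ge b m with hb' | hb'
              · rcases h3 b hb' hch with hmem | hsome
                · rcases List.mem_cons.mp hmem with rfl | hmem'
                  · exact Or.inr (by simp [PySem.Dict.get?_insert_self])
                  · exact Or.inl hmem'
                · rcases eq_or_ne b a with rfl | hba
                  · exact Or.inr (by simp [PySem.Dict.get?_insert_self])
                  · exact Or.inr (by rwa [PySem.Dict.get?_insert_of_ne _ _ hba])
              · have : b = m := by omega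
                subst this
                rw [List.getElem?_eq_getElem h] at hch
                simp [hcl] at hch
          | nil =>
            -- skip an unmatched ')'
            subst hst
            apply ih (m + 1) [] d (by omega)
            refine ⟨?_, h2, ?_⟩
            · intro r hr; simp at hr
            · intro b hb hch
              rcases Nat.lt_or_ge b m with hb' | hb'
              · rcases h3 b hb' hch with hmem | hsome
                · simp at hmem
                · exact Or.inr hsome
              · have : b = m := by omega
                subst this
                rw [List.getElem?_eq_getElem h] at hch
                simp [hcl] at hch
        · -- other character: depth unchanged
          simp only [hop, hcl, if_false]
          apply ih (m + 1) st d (by omega)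
          refine ⟨?_, h2, ?_⟩
          · intro r hr
            obtain ⟨hlt, hsc⟩ := h1 r hr
            refine ⟨by omega, ?_⟩
            rw [hsc, pvScan_step cs (r + 1) h (by omega)]
            simp [pvUpd, hop, hcl]
          · intro b hb hch
            rcases Nat.lt_or_ge b m with hb' | hb'
            · exact h3 b hb' hch
            · have : b = m := by omega
              subst this
              rw [List.getElem?_eq_getElem h] at hch
              simp [hop] at hch
    · -- m past the end: the fold is done
      simp only [pvBuild, dif_neg h]
      refine ⟨h2, ?_⟩
      intro b hb hch hnone
      have hm : b < m := by omega
      rcases h3 b hm hch with hmem | hsome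
      · obtain ⟨r, hr, hra⟩ := List.mem_iff_getElem.mp hmem
        have := (h1 r hr).2
        rw [hra] at this
        rw [this, pvScan_stop_len cs cs.length (r + 1) (by omega)]
        simp
      · rw [hnone] at hsome; simp at hsome

theorem pvLoops_eq (cs : List Char) (mt : PySem.Dict Nat Nat)
    (H1 : ∀ a k, mt.get? a = some k → pvScan cs.length cs (a + 1) 1 = (k + 1, 0))
    (H2 : ∀ a, a < cs.length → cs[a]? = some '(' → mt.get? a = none →
      0 < (pvScan cs.length cs (a + 1) 1).2) :
    ∀ (f i : Nat) (acc : List Char), pvLoopA f cs i acc = pvLoopB f cs mt i acc := by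
  intro f
  induction f with
  | zero => intro i acc; rfl
  | succ f ih =>
    intro i acc
    simp only [pvLoopA, pvLoopB]
    by_cases h : i < cs.length
    · simp only [dif_pos h]
      by_cases hc : cs[i] = '('
      · simp only [hc, ne_eq, not_true_eq_false, if_false, if_true]
        by_cases hcnd : pvSkipWS cs.length cs (i + 1) < cs.length ∧
            (pvPrefixes.any fun p => pvStartsWithAt cs (pvSkipWS cs.length cs (i + 1)) p) = true
        · have hA : ¬ (cs.length ≤ pvSkipWS cs.length cs (i + 1) ∨
              ¬ (pvPrefixes.any fun p => pvStartsWithAt cs (pvSkipWS cs.length cs (i + 1)) p)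
                = true) := by
            push Not; exact ⟨by omega, hcnd.2⟩
          simp only [if_neg hA, if_pos hcnd]
          cases hmt : mt.get? i with
          | some k =>
            have hsc := H1 i k hmt
            simp only [hsc]
            simp only [Nat.lt_irrefl, if_false]
            exact ih (k + 1) acc
          | none =>
            have hpos := H2 i h (by rw [List.getElem?_eq_getElem h, hc]) hmt
            simp only [if_pos hpos]
            exact ih (i + 1) acc
        · have hA : cs.length ≤ pvSkipWS cs.length cs (i + 1) ∨
              ¬ (pvPrefixes.any fun p => pvStartsWithAt cs (pvSkipWS cs.length cs (i + 1)) p)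
                = true := by
            rcases not_and_or.mp hcnd with h1 | h2
            · exact Or.inl (by omega)
            · exact Or.inr h2
          simp only [if_pos hA, if_neg hcnd]
          exact ih (i + 1) (acc ++ ['('])
      · simp only [hc, ne_eq, not_false_eq_true, if_true]
        exact ih (i + 1) (acc ++ [cs[i]])
    · simp [h]

-- ===== VERDICT (by name: the statement is the Claim_ definition above) =====
theorem remove_parentheses_by_prefixes_spec : Claim_equal_remove_parentheses_by_prefixes := by
  intro s _
  show remove_parentheses_by_prefixes s = remove_parentheses_by_prefixes_alt s
  have hInv : pvInv s.toList 0 [] PySem.Dict.empty := by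
    refine ⟨?_, ?_, ?_⟩
    · intro r hr; simp at hr
    · intro a k hk; simp [PySem.Dict.get?_empty] at hk
    · intro a ha; omega
  obtain ⟨H1, H2⟩ :=
    pvBuild_post s.toList s.toList.length 0 [] PySem.Dict.empty (by omega) hInv
  have h := pvLoops_eq s.toList _ H1 H2 s.toList.length 0 []
  show String.ofList (pvLoopA s.toList.length s.toList 0 []) =
    String.ofList
      (pvLoopB s.toList.length s.toList
        (pvBuild s.toList.length s.toList 0 [] PySem.Dict.empty) 0 [])
  exact congrArg String.ofList h
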